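-- pv_equiv track=rewrite | github.com/Ganesh172919/SRL-QA | srl_qa_project/data_loader.py | split_contiguous
-- ===== SOURCE A (Python) =====
-- from typing import Any, Dict, Iterable, List, Sequence, Tuple
--
-- def split_contiguous(indices: Sequence[int]) -> List[Tuple[int, int]]:
--     """Split sorted token indices into contiguous spans."""
--
--     if not indices:
--         return []
--
--     spans: List[Tuple[int, int]] = []
--     start = indices[0]
--     previous = indices[0]
--     for index in indices[1:]:
--         if index == previous + 1:
--             previous = index
--             continue
--         spans.append((start, previous))
--         start = index
--         previous = index
--     spans.append((start, previous))
--     return spans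
-- ===== SOURCE B (Python) =====
-- from itertools import groupby
--
-- def split_contiguous(indices):
--     """Split sorted token indices into contiguous spans."""
--     spans = []
--     for _, grp in groupby(enumerate(indices), key=lambda p: p[1] - p[0]):
--         g = list(grp)
--         spans.append((g[0][1], g[-1][1]))
--     return spans
-- ===== Notes on version B (the rewrite author's own statement) =====
-- stated objective: idiomatic
-- what changed: Replaces the hand-rolled break-detecting scan with start/previous state by itertools.groupby over enumerate(indices) keyed on value-minus-position, which is constant exactly along a maximal +1 run; each group yields (first, last).
import Mathlib
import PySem

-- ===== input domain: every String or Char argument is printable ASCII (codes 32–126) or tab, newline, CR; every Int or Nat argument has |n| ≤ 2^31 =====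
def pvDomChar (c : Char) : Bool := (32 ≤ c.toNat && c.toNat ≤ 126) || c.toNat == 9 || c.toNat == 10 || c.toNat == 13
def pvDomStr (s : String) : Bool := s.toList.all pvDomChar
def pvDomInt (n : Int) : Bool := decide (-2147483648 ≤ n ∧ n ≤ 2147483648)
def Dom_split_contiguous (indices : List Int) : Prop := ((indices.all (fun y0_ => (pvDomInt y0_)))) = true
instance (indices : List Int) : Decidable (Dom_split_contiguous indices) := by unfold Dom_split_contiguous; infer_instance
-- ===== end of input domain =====

-- B replaces A's break-detecting scan by grouping enumerate(indices) on the value-minus-index key (idiomatic itertools.groupby decomposition); same O(n) cost.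


-- ===== PORT A =====
-- the for-loop of A: state (spans, start, previous)
def splitLoop (rest : List Int) (spans : List (Int × Int)) (start previous : Int) : List (Int × Int) :=
  match rest with
  | [] => spans ++ [(start, previous)]
  | index :: rest' =>
    if index = previous + 1 then splitLoop rest' spans start index
    else splitLoop rest' (spans ++ [(start, previous)]) index index

def split_contiguous (indices : List Int) : List (Int × Int) :=
  match indices with
  | [] => []
  | x :: rest => splitLoop rest [] x x

-- ===== PORT B =====
-- enumerate(indices) starting at i
def pvEnumFrom (i : Int) : List Int → List (Int × Int)
  | [] => []
  | x :: xs => (i, x) :: pvEnumFrom (i + 1) xs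

-- itertools.groupby: collect the leading elements whose key p.2 - p.1 equals k, return (group-rest, remainder)
def pvGather (k : Int) : List (Int × Int) → List (Int × Int) × List (Int × Int)
  | [] => ([], [])
  | p :: rest =>
    if p.2 - p.1 = k then
      let gr := pvGather k rest
      (p :: gr.1, gr.2)
    else ([], p :: rest)

-- termination measure for pvGroups
lemma pvGather_length (k : Int) (l : List (Int × Int)) : (pvGather k l).2.length ≤ l.length := by
  induction l with
  | nil => simp [pvGather]
  | cons p rest ih =>
    simp only [pvGather]
    split
    · exact Nat.le_succ_of_le ih
    · simp

def pvGroups : List (Int × Int) → List (List (Int × Int))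
  | [] => []
  | p :: rest =>
    let gr := pvGather (p.2 - p.1) rest
    (p :: gr.1) :: pvGroups gr.2
termination_by l => l.length
decreasing_by
  exact Nat.lt_succ_of_le (pvGather_length _ _)

def split_contiguous_alt (indices : List Int) : List (Int × Int) :=
  (pvGroups (pvEnumFrom 0 indices)).map (fun g => ((g.headD (0, 0)).2, (g.getLastD (0, 0)).2))

-- ===== PRECONDITION & SPEC =====
def Spec_split_contiguous (indices : List Int) (out : List (Int × Int)) : Prop := out = split_contiguous_alt indices
instance (indices : List Int) (out : List (Int × Int)) : Decidable (Spec_split_contiguous indices out) := by unfold Spec_split_contiguous; infer_instance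

-- ===== CLAIM (what is proved, stated in full; the proofs are below) =====
def Claim_equal_split_contiguous : Prop := ∀ (indices : List Int), Dom_split_contiguous indices → Spec_split_contiguous indices (split_contiguous indices)

-- ===== LEMMAS AND PROOFS =====

-- the pure (accumulator-free) form of A's loop
def spansOf (start previous : Int) : List Int → List (Int × Int)
  | [] => [(start, previous)]
  | x :: xs => if x = previous + 1 then spansOf start x xs else (start, previous) :: spansOf x x xs

lemma splitLoop_eq (rest : List Int) : ∀ (spans : List (Int × Int)) (start prev : Int),
    splitLoop rest spans start prev = spans ++ spansOf start prev rest := by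
  induction rest with
  | nil => intro spans start prev; simp [splitLoop, spansOf]
  | cons x xs ih =>
    intro spans start prev
    simp only [splitLoop, spansOf]
    by_cases h : x = prev + 1
    · simp [h, ih]
    · simp [h, ih]

-- last-of-cons for the groupby span extraction
lemma pvGetLast_cons {α : Type} (l : List α) : ∀ (a d : α), ((a :: l).getLast?.getD d) = l.getLast?.getD a := by
  induction l with
  | nil => intro a d; simp
  | cons b l' ih =>
    intro a d
    rw [List.getLast?_cons_cons, ih b d, ih b a]

-- the core correspondence: one open group with first value `start`, previous value `prev` at position i-1
lemma pvMain (xs : List Int) : ∀ (i start prev : Int),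
    spansOf start prev xs =
      (start, ((pvGather (prev + 1 - i) (pvEnumFrom i xs)).1.getLastD (i - 1, prev)).2) ::
        (pvGroups (pvGather (prev + 1 - i) (pvEnumFrom i xs)).2).map
          (fun g => ((g.headD (0, 0)).2, (g.getLastD (0, 0)).2)) := by
  induction xs with
  | nil => intro i start prev; simp [spansOf, pvEnumFrom, pvGather, pvGroups]
  | cons x xs ih =>
    intro i start prev
    simp only [spansOf, pvEnumFrom, pvGather]
    by_cases h : x = prev + 1
    · have hk : x - i = prev + 1 - i := by omega
      simp only [if_pos h, if_pos hk]
      have := ih (i + 1) start x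
      have hk2 : x + 1 - (i + 1) = prev + 1 - i := by omega
      have hd : (i + 1 - 1 : Int) = i := by omega
      rw [hk2, hd] at this
      rw [this]
      simp [List.getLastD_eq_getLast?, pvGetLast_cons]
    · have hk : ¬ (x - i = prev + 1 - i) := by omega
      simp only [if_neg h, if_neg hk]
      rw [pvGroups]
      simp only [List.map_cons, List.getLastD_nil]
      have := ih (i + 1) x x
      have hk2 : x + 1 - (i + 1) = x - i := by omega
      have hd : (i + 1 - 1 : Int) = i := by omega
      rw [hk2, hd] at this
      rw [this]
      simp [List.getLastD_eq_getLast?, pvGetLast_cons]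

-- ===== VERDICT (by name: the statement is the Claim_ definition above) =====
theorem split_contiguous_spec : Claim_equal_split_contiguous := by
  intro indices _
  unfold Spec_split_contiguous
  cases indices with
  | nil => simp [split_contiguous, split_contiguous_alt, pvEnumFrom, pvGroups]
  | cons x xs =>
    simp only [split_contiguous, split_contiguous_alt, pvEnumFrom]
    rw [splitLoop_eq]
    rw [pvGroups]
    simp only [List.map_cons, List.nil_append]
    have := pvMain xs 1 x x
    have hk : (x + 1 - 1 : Int) = x - 0 := by omega
    have hd : (1 - 1 : Int) = 0 := by omega
    rw [hk, hd] at this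
    rw [this]
    simp [List.getLastD_eq_getLast?, pvGetLast_cons]
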